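-- pv_equiv track=rewrite | github.com/Trice99/advent-of-code-2025 | day_11/solution.py | count_all_paths
-- ===== SOURCE A (Python) =====
-- def count_all_paths(graph, start, end):
--     def dfs(current, visited):
--         if current == end:
--             return 1
--
--         if current in visited or current not in graph:
--             return 0
--
--         visited.add(current)
--         total = sum(dfs(neighbor, visited) for neighbor in graph[current])
--         visited.remove(current)
--
--         return total
--
--     return dfs(start, set())
-- ===== SOURCE B (Python) =====
-- def count_all_paths(graph, start, end):
--     # Iterative DFS with an explicit stack of (node, iterator) frames and backtracking,
--     # instead of A's recursion.
--     if start == end: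
--         return 1
--     if start not in graph:
--         return 0
--     total = 0
--     stack = [(start, iter(graph[start]))]
--     visited = {start}
--     while stack:
--         node, it = stack[-1]
--         nxt = next(it, None)
--         if nxt is None:
--             stack.pop()
--             visited.discard(node)
--         elif nxt == end:
--             total += 1
--         elif nxt in graph and nxt not in visited:
--             stack.append((nxt, iter(graph[nxt])))
--             visited.add(nxt)
--     return total
-- ===== Notes on version B (the rewrite author's own statement) =====
-- stated objective: alternative
-- what changed: Replaces A's recursive DFS (mutable visited set with add/remove around a recursive sum) by an iterative explicit-stack DFS: frames of (node, neighbor iterator) with backtracking on pop and a running counter.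
import Mathlib
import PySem

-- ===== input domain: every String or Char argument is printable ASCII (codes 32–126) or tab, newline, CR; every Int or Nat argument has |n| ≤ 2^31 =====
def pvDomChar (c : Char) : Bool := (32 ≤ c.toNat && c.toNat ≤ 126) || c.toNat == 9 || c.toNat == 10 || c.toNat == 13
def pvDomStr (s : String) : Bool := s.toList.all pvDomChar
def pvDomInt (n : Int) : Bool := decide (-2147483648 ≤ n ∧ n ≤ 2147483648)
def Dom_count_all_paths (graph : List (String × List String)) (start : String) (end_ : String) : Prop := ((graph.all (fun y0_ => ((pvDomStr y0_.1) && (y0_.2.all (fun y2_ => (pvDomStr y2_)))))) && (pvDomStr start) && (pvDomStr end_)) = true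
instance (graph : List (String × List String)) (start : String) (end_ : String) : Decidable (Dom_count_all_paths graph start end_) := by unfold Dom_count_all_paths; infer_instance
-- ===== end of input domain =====

-- B replaces A's recursive DFS by an iterative explicit-stack DFS with backtracking (alternative
-- decomposition, same cost); the equivalence proved is about the return value (A mutates only its
-- own local 'visited' set, nothing observable by the caller).

-- ===== PORT A =====

-- Termination of A's dfs: adding an unvisited graph key to 'visited' strictly shrinks the set of
-- unvisited keys (cited by dfsA's decreasing_by).
lemma dfs_measure_lt (graph : List (String × List String)) (visited : PySem.Set String)
    (current : String) (h1 : visited.contains current = false)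
    (h2 : current ∈ graph.map Prod.fst) :
    ((graph.map Prod.fst).filter
        (fun k => !((PySem.Set.add visited current).contains k))).length
      < ((graph.map Prod.fst).filter (fun k => !(visited.contains k))).length := by
  have hstep : ∀ k : String, (!((PySem.Set.add visited current).contains k))
      = ((!(visited.contains k)) && (k != current)) := by
    intro k
    simp [PySem.Set.add_eq_ite]
    by_cases hk : k = current
    · subst hk; simp_all
    · by_cases hv : current ∈ visited <;> simp [hv, hk]
  calc ((graph.map Prod.fst).filter
        (fun k => !((PySem.Set.add visited current).contains k))).length
      = (((graph.map Prod.fst).filter (fun k => !(visited.contains k))).filter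
          (fun k => k != current)).length := by
        rw [List.filter_filter]
        congr 1
        apply List.filter_congr
        intro k _
        rw [hstep k, Bool.and_comm]
    _ < ((graph.map Prod.fst).filter (fun k => !(visited.contains k))).length := by
        rw [List.length_filter_lt_length_iff_exists]
        refine ⟨current, ?_, by simp⟩
        simp only [List.mem_filter]
        exact ⟨h2, by simp [PySem.Set.contains_eq_listContains] at h1 ⊢;
                      simpa [List.contains_iff_mem] using h1⟩

-- A's inner 'dfs': the Python mutates 'visited' (add before the sum, remove after), which each
-- recursive call restores, so every call in the sum sees exactly 'visited ∪ {current}' — ported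
-- as passing 'visited.add current'.
def dfsA (graph : List (String × List String)) (end_ : String) (current : String)
    (visited : PySem.Set String) : Int :=
  if current = end_ then 1
  else if visited.contains current || !((PySem.Dict.mk graph).contains current) then 0
  else (((PySem.Dict.mk graph).getD current []).map
        (fun n => dfsA graph end_ n (PySem.Set.add visited current))).sum
termination_by ((graph.map Prod.fst).filter (fun k => !(visited.contains k))).length
decreasing_by
  apply dfs_measure_lt
  · simp_all
  · have hc : (PySem.Dict.mk graph).contains current = true := by simp_all
    have := (PySem.Dict.contains_iff_mem_keys (PySem.Dict.mk graph) current).mp hc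
    simpa [PySem.Dict.keys_mk] using this

def count_all_paths (graph : List (String × List String)) (start : String) (end_ : String) : Int :=
  dfsA graph end_ start PySem.Set.empty

-- ===== PORT B =====

-- The stack machine of Source B's while loop: frames are (node, remaining neighbours), top first.
-- The Nat argument is fuel — a totality guard only; count_all_paths_alt supplies enough fuel for
-- the loop to run to completion (proved below), so the 0-fuel branch is never reached.
def runB (graph : List (String × List String)) (end_ : String) :
    Nat → List (String × List String) → PySem.Set String → Int → Int
  | 0, _, _, acc => acc
  | _ + 1, [], _, acc => acc
  | f + 1, (node, []) :: fs, visited, acc =>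
      runB graph end_ f fs (PySem.Set.discard visited node) acc
  | f + 1, (node, n :: rest) :: fs, visited, acc =>
      if n = end_ then runB graph end_ f ((node, rest) :: fs) visited (acc + 1)
      else if (PySem.Dict.mk graph).contains n && !(visited.contains n) then
        runB graph end_ f ((n, (PySem.Dict.mk graph).getD n []) :: (node, rest) :: fs)
          (PySem.Set.add visited n) acc
      else runB graph end_ f ((node, rest) :: fs) visited acc

-- largest neighbour-list length in the graph (only used to size the fuel)
def maxDeg (graph : List (String × List String)) : Nat :=
  graph.foldl (fun m p => max m p.2.length) 0

def count_all_paths_alt (graph : List (String × List String)) (start : String) (end_ : String) : Int :=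
  if start = end_ then 1
  else if !((PySem.Dict.mk graph).contains start) then 0
  else runB graph end_ ((maxDeg graph + 2) ^ (graph.length + 2))
        [(start, (PySem.Dict.mk graph).getD start [])]
        (PySem.Set.add PySem.Set.empty start) 0

-- ===== PRECONDITION & SPEC =====
def Spec_count_all_paths (graph : List (String × List String)) (start : String) (end_ : String) (out : Int) : Prop := out = count_all_paths_alt graph start end_
instance (graph : List (String × List String)) (start : String) (end_ : String) (out : Int) : Decidable (Spec_count_all_paths graph start end_ out) := by unfold Spec_count_all_paths; infer_instance

-- ===== CLAIM (what is proved, stated in full; the proofs are below) =====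
def Claim_equal_count_all_paths : Prop := ∀ (graph : List (String × List String)) (start : String) (end_ : String), Dom_count_all_paths graph start end_ → Spec_count_all_paths graph start end_ (count_all_paths graph start end_)

-- ===== LEMMAS AND PROOFS =====

lemma dfsA_end (graph : List (String × List String)) (end_ : String) (v : PySem.Set String) :
    dfsA graph end_ end_ v = 1 := by rw [dfsA]; simp

lemma dfsA_zero (graph : List (String × List String)) (end_ cur : String) (v : PySem.Set String)
    (h1 : cur ≠ end_)
    (h2 : v.contains cur = true ∨ (PySem.Dict.mk graph).contains cur = false) :
    dfsA graph end_ cur v = 0 := by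
  rw [dfsA]
  rcases h2 with h2 | h2
  · have hm : cur ∈ v := by simpa using h2
    simp [h1, hm]
  · simp [h1, h2]

lemma dfsA_step (graph : List (String × List String)) (end_ cur : String) (v : PySem.Set String)
    (h1 : cur ≠ end_) (h2 : (PySem.Dict.mk graph).contains cur = true)
    (h3 : v.contains cur = false) :
    dfsA graph end_ cur v = (((PySem.Dict.mk graph).getD cur []).map
        (fun n => dfsA graph end_ n (PySem.Set.add v cur))).sum := by
  rw [dfsA]
  have hm : cur ∉ v := by simpa using h3
  simp [h1, h2, hm]

lemma discard_append_self (v : PySem.Set String) (n : String) (h : n ∉ v) :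
    PySem.Set.discard (v ++ [n]) n = v := by
  show List.filter _ _ = _
  rw [List.filter_append]
  simp only [List.filter_cons, List.filter_nil]
  rw [List.filter_eq_self.mpr ?_] <;> simp_all
  intro a ha hc
  exact h (by simpa [hc] using ha)

-- the recursive-call totals still pending in a machine state: for each frame, the dfsA-sum of its
-- remaining neighbours, the visited set losing that frame's node for the frames below it
def pendingB (graph : List (String × List String)) (end_ : String) :
    List (String × List String) → PySem.Set String → Int
  | [], _ => 0
  | (node, rest) :: fs, v =>
      (rest.map (fun n => dfsA graph end_ n v)).sum
        + pendingB graph end_ fs (PySem.Set.discard v node)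

-- weight of a machine state: frame at exponent e on top, deeper frames at higher exponents
def Mtf (BB : Nat) : Nat → List (String × List String) → Nat
  | _, [] => 0
  | e, f :: fs => (f.2.length + 1) * BB ^ e + Mtf BB (e + 1) fs

-- the machine's invariant: visited is exactly the stack's nodes (bottom first), distinct, all keys
def InvB (graph : List (String × List String)) (frames : List (String × List String))
    (v : PySem.Set String) : Prop :=
  v = (frames.map Prod.fst).reverse ∧ (frames.map Prod.fst).Nodup ∧
    ∀ x ∈ frames.map Prod.fst, x ∈ graph.map Prod.fst

lemma nodup_subset_length_le (l l' : List String) (h : l.Nodup) (hs : ∀ x ∈ l, x ∈ l') :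
    l.length ≤ l'.length := by
  classical
  calc l.length = l.toFinset.card := (List.toFinset_card_of_nodup h).symm
    _ ≤ l'.toFinset.card := Finset.card_le_card
        (by intro x hx; simp only [List.mem_toFinset] at *; exact hs x hx)
    _ ≤ l'.length := l'.toFinset_card_le

lemma frames_len_le (graph frames : List (String × List String)) (v : PySem.Set String)
    (h : InvB graph frames v) : frames.length ≤ graph.length := by
  obtain ⟨-, hnd, hsub⟩ := h
  simpa using nodup_subset_length_le _ _ hnd hsub

lemma foldl_max_init_le : ∀ (l : List (String × List String)) (i : Nat),
    i ≤ l.foldl (fun m p => max m p.2.length) i := by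
  intro l
  induction l with
  | nil => simp
  | cons h t ih => intro i; exact le_trans (Nat.le_max_left _ _) (ih _)

lemma len_le_foldl_max : ∀ (l : List (String × List String)) (i : Nat) (p : String × List String),
    p ∈ l → p.2.length ≤ l.foldl (fun m p => max m p.2.length) i := by
  intro l
  induction l with
  | nil => simp
  | cons h t ih =>
    intro i p hp
    rcases List.mem_cons.mp hp with rfl | hp
    · exact le_trans (Nat.le_max_right _ _) (foldl_max_init_le _ _)
    · exact ih _ _ hp

lemma getD_length_le_maxDeg (graph : List (String × List String)) (n : String) :
    ((PySem.Dict.mk graph).getD n []).length ≤ maxDeg graph := by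
  rw [PySem.Dict.getD_eq_get?_getD]
  cases hg : (PySem.Dict.mk graph).get? n with
  | none => simp
  | some w =>
    have hm := PySem.Dict.mem_items_of_get?_eq_some _ hg
    simpa using len_le_foldl_max graph 0 (n, w) hm

lemma run_eq (graph : List (String × List String)) (end_ : String) :
    ∀ (fuel : Nat) (frames : List (String × List String)) (v : PySem.Set String) (acc : Int),
      InvB graph frames v →
      Mtf (maxDeg graph + 2) (graph.length + 2 - frames.length) frames ≤ fuel →
      runB graph end_ fuel frames v acc = acc + pendingB graph end_ frames v := by
  intro fuel
  induction fuel with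
  | zero =>
    intro frames v acc hinv hfuel
    match frames with
    | [] => simp [runB, pendingB]
    | (node, rest) :: fs =>
      exfalso
      have hpow : 0 < (maxDeg graph + 2) ^ (graph.length + 2 - (fs.length + 1)) :=
        Nat.pow_pos (by omega)
      simp only [Mtf, List.length_cons] at hfuel
      have h1 : 0 < (rest.length + 1) * (maxDeg graph + 2) ^ (graph.length + 2 - (fs.length + 1)) :=
        Nat.mul_pos (by omega) hpow
      linarith [hfuel, h1]
  | succ f ih =>
    intro frames v acc hinv hfuel
    match frames with
    | [] => simp [runB, pendingB]
    | (node, []) :: fs =>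
      obtain ⟨hv, hnd, hsub⟩ := hinv
      have hlen1 : fs.length + 1 ≤ graph.length := by
        simpa using frames_len_le graph ((node, []) :: fs) v ⟨hv, hnd, hsub⟩
      have hnd0 : node ∉ fs.map Prod.fst ∧ (fs.map Prod.fst).Nodup := by
        simpa using hnd
      have hvd : PySem.Set.discard v node = (fs.map Prod.fst).reverse := by
        rw [hv]
        simp only [List.map_cons, List.reverse_cons]
        exact discard_append_self _ _ (by simpa using hnd0.1)
      have hinv' : InvB graph fs (PySem.Set.discard v node) :=
        ⟨hvd, hnd0.2, fun x hx => hsub x (by simp [hx])⟩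
      have hpow : 0 < (maxDeg graph + 2) ^ (graph.length + 2 - (fs.length + 1)) :=
        Nat.pow_pos (by omega)
      have hfuel' : Mtf (maxDeg graph + 2) (graph.length + 2 - fs.length) fs ≤ f := by
        simp only [Mtf, List.length_cons] at hfuel
        have heq : graph.length + 2 - (fs.length + 1) + 1 = graph.length + 2 - fs.length := by
          omega
        rw [heq] at hfuel
        simp only [List.length_nil] at hfuel
        linarith [hfuel, hpow]
      simp only [runB]
      rw [ih fs _ acc hinv' hfuel']
      simp [pendingB]
    | (node, n :: rest) :: fs =>
      obtain ⟨hv, hnd, hsub⟩ := hinv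
      have hlen1 : fs.length + 1 ≤ graph.length := by
        simpa using frames_len_le graph ((node, n :: rest) :: fs) v ⟨hv, hnd, hsub⟩
      have hpow : 0 < (maxDeg graph + 2) ^ (graph.length + 2 - (fs.length + 1)) :=
        Nat.pow_pos (by omega)
      have hfuel0 : (rest.length + 1 + 1) * (maxDeg graph + 2) ^ (graph.length + 2 - (fs.length + 1))
          + Mtf (maxDeg graph + 2) (graph.length + 2 - (fs.length + 1) + 1) fs ≤ f + 1 := by
        simpa [Mtf] using hfuel
      have hinv1 : InvB graph ((node, rest) :: fs) v := ⟨hv, hnd, hsub⟩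
      have hfuel1 : Mtf (maxDeg graph + 2)
          (graph.length + 2 - ((node, rest) :: fs).length) ((node, rest) :: fs) ≤ f := by
        simp only [Mtf, List.length_cons]
        have hdist : (rest.length + 1 + 1) * (maxDeg graph + 2) ^ (graph.length + 2 - (fs.length + 1))
            = (rest.length + 1) * (maxDeg graph + 2) ^ (graph.length + 2 - (fs.length + 1))
              + (maxDeg graph + 2) ^ (graph.length + 2 - (fs.length + 1)) := by ring
        linarith [hfuel0, hpow, hdist]
      by_cases hne : n = end_
      · simp only [runB]
        rw [if_pos hne]
        rw [ih _ _ _ hinv1 hfuel1]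
        have h1 : dfsA graph end_ n v = 1 := by rw [hne]; exact dfsA_end graph end_ v
        simp only [pendingB, List.map_cons, List.sum_cons, h1]
        ring
      · by_cases hcond : ((PySem.Dict.mk graph).contains n && !(v.contains n)) = true
        · -- push
          have hcn : (PySem.Dict.mk graph).contains n = true := by
            cases h : (PySem.Dict.mk graph).contains n
            · rw [h] at hcond; simp at hcond
            · rfl
          have hvn : v.contains n = false := by
            cases h : v.contains n
            · rfl
            · rw [h] at hcond; simp at hcond
          have hmemn : n ∉ v := by simpa using hvn
          have hkeyn : n ∈ graph.map Prod.fst := by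
            have := (PySem.Dict.contains_iff_mem_keys (PySem.Dict.mk graph) n).mp hcn
            simpa [PySem.Dict.keys_mk] using this
          have hvadd : PySem.Set.add v n = v ++ [n] := PySem.Set.add_of_not_mem hmemn
          have hnstk : n ∉ node :: fs.map Prod.fst := fun hmem =>
            hmemn (by rw [hv]; exact List.mem_reverse.mpr hmem)
          have hinv2 : InvB graph
              ((n, (PySem.Dict.mk graph).getD n []) :: (node, rest) :: fs)
              (PySem.Set.add v n) := by
            refine ⟨?_, ?_, ?_⟩
            · rw [hvadd, hv]
              simp
            · exact List.nodup_cons.mpr ⟨hnstk, hnd⟩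
            · intro x hx
              rcases List.mem_cons.mp hx with rfl | hx
              · exact hkeyn
              · exact hsub x hx
          have hlen2 : fs.length + 2 ≤ graph.length := by
            simpa using frames_len_le graph _ _ hinv2
          have hnb : ((PySem.Dict.mk graph).getD n []).length + 2 ≤ maxDeg graph + 2 := by
            have := getD_length_le_maxDeg graph n
            omega
          have hq : 0 < (maxDeg graph + 2) ^ (graph.length + 2 - (fs.length + 2)) :=
            Nat.pow_pos (by omega)
          have hpe : (maxDeg graph + 2) ^ (graph.length + 2 - (fs.length + 1))
              = (maxDeg graph + 2) ^ (graph.length + 2 - (fs.length + 2)) * (maxDeg graph + 2) := by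
            rw [← pow_succ]
            congr 1
            omega
          have h5 : (((PySem.Dict.mk graph).getD n []).length + 1)
                * (maxDeg graph + 2) ^ (graph.length + 2 - (fs.length + 2))
                + (maxDeg graph + 2) ^ (graph.length + 2 - (fs.length + 2))
              ≤ (maxDeg graph + 2) ^ (graph.length + 2 - (fs.length + 1)) := by
            calc (((PySem.Dict.mk graph).getD n []).length + 1)
                  * (maxDeg graph + 2) ^ (graph.length + 2 - (fs.length + 2))
                  + (maxDeg graph + 2) ^ (graph.length + 2 - (fs.length + 2))
                = (((PySem.Dict.mk graph).getD n []).length + 2)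
                  * (maxDeg graph + 2) ^ (graph.length + 2 - (fs.length + 2)) := by ring
              _ ≤ (maxDeg graph + 2)
                  * (maxDeg graph + 2) ^ (graph.length + 2 - (fs.length + 2)) :=
                  Nat.mul_le_mul_right _ hnb
              _ = (maxDeg graph + 2) ^ (graph.length + 2 - (fs.length + 1)) := by
                  rw [hpe, Nat.mul_comm]
          have hfuel2 : Mtf (maxDeg graph + 2)
              (graph.length + 2 - ((n, (PySem.Dict.mk graph).getD n []) :: (node, rest) :: fs).length)
              ((n, (PySem.Dict.mk graph).getD n []) :: (node, rest) :: fs) ≤ f := by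
            simp only [Mtf, List.length_cons]
            have he1 : graph.length + 2 - (fs.length + 1 + 1) + 1
                = graph.length + 2 - (fs.length + 1) := by omega
            have he2 : graph.length + 2 - (fs.length + 1 + 1) + 1 + 1
                = graph.length + 2 - (fs.length + 1) + 1 := by omega
            rw [he2, he1]
            have he3 : graph.length + 2 - (fs.length + 1 + 1)
                = graph.length + 2 - (fs.length + 2) := by omega
            rw [he3]
            linarith [hfuel0, h5, hq]
          simp only [runB, if_neg hne, if_pos hcond]
          rw [ih _ _ _ hinv2 hfuel2]
          have hd : PySem.Set.discard (PySem.Set.add v n) n = v := by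
            rw [hvadd]
            exact discard_append_self _ _ hmemn
          have hstep := dfsA_step graph end_ n v hne hcn hvn
          simp only [pendingB, hd, List.map_cons, List.sum_cons]
          rw [hstep]
          ring
        · -- skip
          have hz : dfsA graph end_ n v = 0 := by
            apply dfsA_zero _ _ _ _ hne
            cases hcn : (PySem.Dict.mk graph).contains n
            · exact Or.inr rfl
            · cases hb : v.contains n
              · exact absurd (by rw [hcn, hb]; rfl) hcond
              · exact Or.inl rfl
          simp only [runB, if_neg hne, if_neg hcond]
          rw [ih _ _ _ hinv1 hfuel1]
          simp only [pendingB, List.map_cons, List.sum_cons, hz]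
          ring


-- ===== VERDICT (by name: the statement is the Claim_ definition above) =====
theorem count_all_paths_spec : Claim_equal_count_all_paths := by
  intro graph start end_ _
  unfold Spec_count_all_paths count_all_paths count_all_paths_alt
  by_cases h1 : start = end_
  · subst h1
    simp [dfsA_end]
  · by_cases h2 : (PySem.Dict.mk graph).contains start = true
    · have hkey : start ∈ graph.map Prod.fst := by
        have := (PySem.Dict.contains_iff_mem_keys (PySem.Dict.mk graph) start).mp h2
        simpa [PySem.Dict.keys_mk] using this
      have hadd : PySem.Set.add (PySem.Set.empty (α := String)) start = [start] := by
        simp [PySem.Set.empty]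
      have hinv : InvB graph [(start, (PySem.Dict.mk graph).getD start [])] [start] := by
        refine ⟨by simp, by simp, ?_⟩
        intro x hx
        simp at hx
        subst hx; exact hkey
      have hfuel : Mtf (maxDeg graph + 2) (graph.length + 2 - 1)
          [(start, (PySem.Dict.mk graph).getD start [])]
            ≤ (maxDeg graph + 2) ^ (graph.length + 2) := by
        simp only [Mtf]
        have hle : ((PySem.Dict.mk graph).getD start []).length + 1 ≤ maxDeg graph + 2 := by
          have := getD_length_le_maxDeg graph start
          omega
        have hmul := Nat.mul_le_mul_right ((maxDeg graph + 2) ^ (graph.length + 2 - 1)) hle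
        have hpow : (maxDeg graph + 2) * (maxDeg graph + 2) ^ (graph.length + 2 - 1)
            = (maxDeg graph + 2) ^ (graph.length + 2) := by
          have he : graph.length + 2 - 1 + 1 = graph.length + 2 := by omega
          rw [← pow_succ', he]
        linarith [hmul, hpow.le, hpow.ge]
      rw [if_neg h1, if_neg (by rw [h2]; simp), hadd]
      rw [run_eq graph end_ _ _ _ _ hinv hfuel]
      rw [dfsA_step graph end_ start PySem.Set.empty h1 h2 (by rfl), hadd]
      simp [pendingB]
    · have h2' : (PySem.Dict.mk graph).contains start = false := by
        cases h : (PySem.Dict.mk graph).contains start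
        · rfl
        · exact absurd h h2
      rw [dfsA_zero graph end_ start PySem.Set.empty h1 (Or.inr h2'), if_neg h1,
        if_pos (by rw [h2']; rfl)]
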